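-- pv_equiv track=rewrite | github.com/vishnumahesha/inkclone | profiles/migrate.py | _stem_to_char
-- ===== SOURCE A (Python) =====
-- _PUNCT_ALIASES = {
--     "period": ".",  "comma": ",",  "exclaim": "!",  "question": "?",
--     "apostrophe": "'",  "hyphen": "-",  "colon": ":",  "semicolon": ";",
--     "lparen": "(",  "rparen": ")", "hash": "#", "at": "@",
--     "ampersand": "&", "slash": "/", "quote": '"',
-- }
--
-- def _stem_to_char(stem: str) -> str | None:
--     """Map a glyph filename stem to its character.
--
--     Examples:
--       a_0              → 'a'
--       upper_P_0        → 'P'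
--       upper_T_fallback → 'T'
--       digit_0_0        → '0'
--       digit_5_fallback → '5'
--       period_0         → '.'
--       comma_0          → ','
--     """
--     working = stem
--     if working.endswith("_fallback"):
--         working = working[: -len("_fallback")]
--
--     # Punctuation aliases
--     for alias, ch in _PUNCT_ALIASES.items():
--         if working == alias or working.startswith(alias + "_"):
--             return ch
--
--     if working.startswith("upper_"):
--         rest = working[len("upper_") :]
--         parts = rest.split("_")
--         if parts and len(parts[0]) == 1 and parts[0].isupper():
--             return parts[0]
--         return None
--
--     if working.startswith("digit_"):
--         rest = working[len("digit_") :]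
--         parts = rest.split("_")
--         if parts and parts[0].isdigit():
--             return parts[0]
--         return None
--
--     parts = working.split("_")
--     if parts and len(parts[0]) == 1:
--         return parts[0]
--
--     return None
-- ===== SOURCE B (Python) =====
-- _PUNCT_ALIASES = {
--     "period": ".",  "comma": ",",  "exclaim": "!",  "question": "?",
--     "apostrophe": "'",  "hyphen": "-",  "colon": ":",  "semicolon": ";",
--     "lparen": "(",  "rparen": ")", "hash": "#", "at": "@",
--     "ampersand": "&", "slash": "/", "quote": '"',
-- }
--
--
-- def _constant(ch):
--     def handler(arg):
--         return ch
--     return handler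
--
--
-- def _upper_handler(arg):
--     return arg if arg is not None and len(arg) == 1 and arg.isupper() else None
--
--
-- def _digit_handler(arg):
--     return arg if arg is not None and arg.isdigit() else None
--
--
-- # One handler table built once: every recognised head token maps to a function of
-- # the (optional) second token; the dispatch itself is a single dict lookup.
-- _HANDLERS = {alias: _constant(ch) for alias, ch in _PUNCT_ALIASES.items()}
-- _HANDLERS["upper"] = _upper_handler
-- _HANDLERS["digit"] = _digit_handler
--
--
-- def _stem_to_char(stem: str) -> str | None:
--     """Map a glyph filename stem to its character (table-driven handler dispatch)."""
--     working = stem[:-len("_fallback")] if stem.endswith("_fallback") else stem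
--     head, sep, tail = working.partition("_")
--     arg = tail.partition("_")[0] if sep else None
--     handler = _HANDLERS.get(head)
--     if handler is not None:
--         return handler(arg)
--     return head if len(head) == 1 else None
-- ===== Notes on version B (the rewrite author's own statement) =====
-- stated objective: alternative
-- what changed: B replaces A's cascade of conditionals (alias scan with equality/startswith tests, then prefix-check-and-resplit branches) with a table of first-class handler functions built once (constant handlers for punctuation aliases plus the upper/digit validators): the stem is tokenized with partition, and dispatch is a single dict lookup whose handler is applied to the optional second token.
import Mathlib
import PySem

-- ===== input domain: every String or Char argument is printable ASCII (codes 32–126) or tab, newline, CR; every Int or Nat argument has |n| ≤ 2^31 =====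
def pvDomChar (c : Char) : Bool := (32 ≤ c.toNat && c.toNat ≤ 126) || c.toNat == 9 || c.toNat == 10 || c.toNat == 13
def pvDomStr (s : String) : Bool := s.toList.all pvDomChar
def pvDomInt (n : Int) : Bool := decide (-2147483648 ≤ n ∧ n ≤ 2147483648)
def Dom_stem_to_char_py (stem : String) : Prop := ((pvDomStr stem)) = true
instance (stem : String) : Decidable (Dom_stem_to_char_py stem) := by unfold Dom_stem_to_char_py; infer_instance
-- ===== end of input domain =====

-- B builds a handler table once (constant handlers for the punctuation aliases plus upper/digit
-- validators) and dispatches with one dict lookup on the partition-extracted head token,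
-- replacing A's cascade of conditionals with per-alias startswith tests and re-splits; objective: alternative.

-- ===== PORT A =====

-- the module-level _PUNCT_ALIASES dict, as an (insertion-ordered) list of pairs
def pvAliasPairs : List (List Char × List Char) :=
  [("period".toList, ".".toList), ("comma".toList, ",".toList), ("exclaim".toList, "!".toList),
   ("question".toList, "?".toList), ("apostrophe".toList, "'".toList), ("hyphen".toList, "-".toList),
   ("colon".toList, ":".toList), ("semicolon".toList, ";".toList), ("lparen".toList, "(".toList),
   ("rparen".toList, ")".toList), ("hash".toList, "#".toList), ("at".toList, "@".toList),
   ("ampersand".toList, "&".toList), ("slash".toList, "/".toList), ("quote".toList, "\"".toList)]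

-- s.isupper() as both Pythons call it: only ever on a string already checked to have length 1,
-- where Python's rule is exactly 'the single character is uppercase' (exact on ASCII via PySem.Chars.isupper)
def pvIsupper1 (l : List Char) : Bool :=
  match l with
  | [c] => PySem.Chars.isupper c
  | _ => false

-- A's 'for alias, ch in _PUNCT_ALIASES.items(): if working == alias or working.startswith(alias + "_"): return ch'
def pvAliasLoop : List (List Char × List Char) → List Char → Option (List Char)
  | [], _ => none
  | (a, ch) :: restPairs, w =>
      if w == a || PySem.Chars.startswith w (a ++ "_".toList) then some ch
      else pvAliasLoop restPairs w

-- A's body after the '_fallback' strip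
def pvStemA (working : List Char) : Option (List Char) :=
  match pvAliasLoop pvAliasPairs working with
  | some ch => some ch
  | none =>
    if PySem.Chars.startswith working "upper_".toList then
      let rest := PySem.Chars.slice working (some 6) none       -- working[len("upper_"):]
      let parts := PySem.Chars.splitOn rest "_".toList
      match parts with
      | [] => none
      | p0 :: _ => if p0.length == 1 && pvIsupper1 p0 then some p0 else none
    else if PySem.Chars.startswith working "digit_".toList then
      let rest := PySem.Chars.slice working (some 6) none       -- working[len("digit_"):]
      let parts := PySem.Chars.splitOn rest "_".toList
      match parts with
      | [] => none
      | p0 :: _ => if PySem.Chars.strIsdigit p0 then some p0 else none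
    else
      match PySem.Chars.splitOn working "_".toList with
      | [] => none
      | p0 :: _ => if p0.length == 1 then some p0 else none

def stem_to_char_py (stem : String) : Option String :=
  let w := stem.toList
  -- working = stem[:-len("_fallback")] if it ends with "_fallback" (len = 9)
  let working := if PySem.Chars.endswith w "_fallback".toList then PySem.Chars.slice w none (some (-9)) else w
  (pvStemA working).map String.ofList

-- ===== PORT B =====

-- exact hand port of str.partition("_") (one-character separator): (before, found?, after)
def pvPartition : List Char → List Char × Bool × List Char
  | [] => ([], false, [])
  | c :: rest =>
      if c = '_' then ([], true, rest)
      else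
        let (h, s, t) := pvPartition rest
        (c :: h, s, t)

-- _upper_handler / _digit_handler / _constant from Source B
def pvUpperH (arg : Option (List Char)) : Option (List Char) :=
  match arg with
  | some t => if t.length == 1 && pvIsupper1 t then some t else none
  | none => none

def pvDigitH (arg : Option (List Char)) : Option (List Char) :=
  match arg with
  | some t => if PySem.Chars.strIsdigit t then some t else none
  | none => none

-- _HANDLERS: the alias comprehension (constant handlers) followed by the two assignments
def pvHandlers : PySem.Dict (List Char) (Option (List Char) → Option (List Char)) :=
  PySem.Dict.mk
    ((pvAliasPairs.map (fun p => (p.1, fun _ => some p.2)))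
      ++ [("upper".toList, pvUpperH), ("digit".toList, pvDigitH)])

-- B's body after the '_fallback' strip
def pvStemB (working : List Char) : Option (List Char) :=
  let (head, sep, tail) := pvPartition working
  let arg : Option (List Char) := if sep then some (pvPartition tail).1 else none
  match pvHandlers.get? head with
  | some h => h arg
  | none => if head.length == 1 then some head else none

def stem_to_char_py_alt (stem : String) : Option String :=
  let w := stem.toList
  let working := if PySem.Chars.endswith w "_fallback".toList then PySem.Chars.slice w none (some (-9)) else w
  (pvStemB working).map String.ofList

-- ===== PRECONDITION & SPEC =====
def Spec_stem_to_char_py (stem : String) (out : Option String) : Prop := out = stem_to_char_py_alt stem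
instance (stem : String) (out : Option String) : Decidable (Spec_stem_to_char_py stem out) := by unfold Spec_stem_to_char_py; infer_instance

-- ===== CLAIM (what is proved, stated in full; the proofs are below) =====
def Claim_equal_stem_to_char_py : Prop := ∀ (stem : String), Dom_stem_to_char_py stem → Spec_stem_to_char_py stem (stem_to_char_py stem)

-- ===== LEMMAS AND PROOFS =====

-- reference splitter: PySem.Chars.splitOn on the one-character separator "_"
def pvMsplit : List Char → List Char → List (List Char)
  | cur, [] => [cur.reverse]
  | cur, c :: rest => if c = '_' then cur.reverse :: pvMsplit [] rest else pvMsplit (c :: cur) rest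

theorem pvGo_eq_msplit : ∀ (l : List Char) (fuel : Nat) (cur : List Char) (acc : List (List Char)),
    l.length < fuel →
    PySem.Chars.splitOn.go ['_'] fuel l cur acc = acc.reverse ++ pvMsplit cur l := by
  intro l
  induction l with
  | nil =>
    intro fuel cur acc h
    cases fuel with
    | zero => omega
    | succ f => simp [PySem.Chars.splitOn.go, pvMsplit]
  | cons c rest ih =>
    intro fuel cur acc h
    cases fuel with
    | zero => omega
    | succ f =>
      by_cases hc : c = '_'
      · subst hc
        simp only [PySem.Chars.splitOn.go, List.isPrefixOf, beq_self_eq_true, Bool.true_and,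
          if_true, List.length_singleton, List.drop_one, List.tail_cons]
        rw [ih f [] (cur.reverse :: acc) (by simp only [List.length_cons] at h; omega)]
        simp [pvMsplit]
      · have hb : (('_' : Char) == c) = false := by
          simp; exact fun h' => hc h'.symm
        simp only [PySem.Chars.splitOn.go, List.isPrefixOf, hb, Bool.false_and]
        rw [ih f (c :: cur) acc (by simp only [List.length_cons] at h; omega)]
        simp [pvMsplit, hc]

theorem pvSplitOn_eq (w : List Char) :
    PySem.Chars.splitOn w "_".toList = pvMsplit [] w := by
  have h : "_".toList = ['_'] := rfl
  rw [h]
  show PySem.Chars.splitOn.go ['_'] (w.length + 1) w [] [] = pvMsplit [] w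
  rw [pvGo_eq_msplit w (w.length + 1) [] [] (by omega)]
  rfl

theorem pvMsplit_no : ∀ (w cur : List Char), '_' ∉ w → pvMsplit cur w = [cur.reverse ++ w] := by
  intro w
  induction w with
  | nil => intro cur _; simp [pvMsplit]
  | cons c rest ih =>
    intro cur h
    have hc : c ≠ '_' := fun hh => h (by simp [hh])
    have hr : '_' ∉ rest := fun hh => h (by simp [hh])
    simp [pvMsplit, hc, ih (c :: cur) hr]

theorem pvMsplit_app : ∀ (a b cur : List Char), '_' ∉ a →
    pvMsplit cur (a ++ '_' :: b) = (cur.reverse ++ a) :: pvMsplit [] b := by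
  intro a
  induction a with
  | nil => intro b cur _; simp [pvMsplit]
  | cons c rest ih =>
    intro b cur h
    have hc : c ≠ '_' := fun hh => h (by simp [hh])
    have hr : '_' ∉ rest := fun hh => h (by simp [hh])
    simp [pvMsplit, hc, ih b (c :: cur) hr]

-- every string is either underscore-free or splits off an underscore-free first chunk
theorem pvDecomp (w : List Char) : '_' ∉ w ∨ ∃ a b, '_' ∉ a ∧ w = a ++ '_' :: b := by
  induction w with
  | nil => left; simp
  | cons c rest ih =>
    by_cases hc : c = '_'
    · right; exact ⟨[], rest, by simp, by simp [hc]⟩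
    · cases ih with
      | inl h => left; simp [h, Ne.symm hc]
      | inr h =>
        obtain ⟨a, b, ha, hw⟩ := h
        right
        exact ⟨c :: a, b, by simp [ha, Ne.symm hc], by simp [hw]⟩

theorem pvPartition_no : ∀ (w : List Char), '_' ∉ w → pvPartition w = (w, false, []) := by
  intro w
  induction w with
  | nil => intro _; rfl
  | cons c rest ih =>
    intro h
    have hc : c ≠ '_' := fun hh => h (by simp [hh])
    have hr : '_' ∉ rest := fun hh => h (by simp [hh])
    simp [pvPartition, hc, ih hr]

theorem pvPartition_app : ∀ (a b : List Char), '_' ∉ a →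
    pvPartition (a ++ '_' :: b) = (a, true, b) := by
  intro a
  induction a with
  | nil => intro b _; simp [pvPartition]
  | cons c rest ih =>
    intro b h
    have hc : c ≠ '_' := fun hh => h (by simp [hh])
    have hr : '_' ∉ rest := fun hh => h (by simp [hh])
    simp [pvPartition, hc, ih b hr]

-- the first component of pvMsplit [] b is the first component of pvPartition b
theorem pvMsplit_head (b : List Char) : ∃ t, pvMsplit [] b = (pvPartition b).1 :: t := by
  rcases pvDecomp b with hno | ⟨c, d, hc, hb⟩
  · rw [pvMsplit_no b [] hno, pvPartition_no b hno]
    exact ⟨[], rfl⟩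
  · subst hb
    rw [pvMsplit_app c d [] hc, pvPartition_app c d hc]
    exact ⟨pvMsplit [] d, rfl⟩

theorem pvStartswith_no_us (w a : List Char) (hw : '_' ∉ w) :
    PySem.Chars.startswith w (a ++ ['_']) = false := by
  by_contra h
  have h' : PySem.Chars.startswith w (a ++ ['_']) = true := by
    cases hb : PySem.Chars.startswith w (a ++ ['_']) with
    | false => exact absurd hb h
    | true => rfl
  have hp : (a ++ ['_']) <+: w := (PySem.Chars.startswith_iff _ _).mp h'
  exact hw (hp.subset (by simp))

theorem pvPrefix_us : ∀ (a t u : List Char), '_' ∉ a → '_' ∉ t →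
    (PySem.Chars.startswith (t ++ '_' :: u) (a ++ ['_']) = true ↔ a = t) := by
  intro a
  induction a with
  | nil =>
    intro t u _ ht
    rw [PySem.Chars.startswith_iff]
    cases t with
    | nil => simp [List.cons_prefix_cons]
    | cons c tr =>
      have hc : '_' ≠ c := fun hh => ht (by simp [← hh])
      simp [List.cons_prefix_cons, hc]
  | cons c ar ih =>
    intro t u ha ht
    have har : '_' ∉ ar := fun hh => ha (by simp [hh])
    have hac : c ≠ '_' := fun hh => ha (by simp [hh])
    cases t with
    | nil =>
      rw [PySem.Chars.startswith_iff]
      simp [List.cons_prefix_cons, hac]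
    | cons d tr =>
      have htr : '_' ∉ tr := fun hh => ht (by simp [hh])
      have hih := ih tr u har htr
      rw [PySem.Chars.startswith_iff] at hih ⊢
      simp only [List.cons_append, List.cons_prefix_cons]
      rw [hih, List.cons.injEq]

theorem pvAliasKeys_no_us : ∀ p ∈ pvAliasPairs, '_' ∉ p.1 := by decide

theorem pvBeq_comm (w p : List Char) : (w == p) = (p == w) := by
  by_cases h : w = p
  · subst h; rfl
  · rw [beq_eq_false_iff_ne.mpr h, beq_eq_false_iff_ne.mpr (Ne.symm h)]

theorem pvAliasLoop_eq_get : ∀ (L : List (List Char × List Char)) (w t : List Char),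
    (∀ p ∈ L, (w == p.1 || PySem.Chars.startswith w (p.1 ++ "_".toList)) = (p.1 == t)) →
    pvAliasLoop L w = (PySem.Dict.mk L).get? t := by
  intro L
  induction L with
  | nil => intro w t _; rfl
  | cons p rest ih =>
    intro w t h
    obtain ⟨a, ch⟩ := p
    rw [PySem.Dict.get?_mk_cons]
    have hc := h (a, ch) (by simp)
    simp only at hc
    rw [pvAliasLoop, hc]
    by_cases hk : (a == t) = true
    · simp [hk]
    · have hk' : (a == t) = false := by
        cases hb : (a == t) with
        | false => rfl
        | true => exact absurd hb hk
      simp only [hk']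
      exact ih w t (fun q hq => h q (by simp [hq]))

-- B's handler-table lookup, expressed through the alias dict plus the two appended entries
theorem pvGet_map_append : ∀ (L : List (List Char × List Char))
    (M : List (List Char × (Option (List Char) → Option (List Char)))) (t : List Char),
    (PySem.Dict.mk ((L.map (fun p => (p.1, fun (_ : Option (List Char)) => some p.2))) ++ M)).get? t =
      (match (PySem.Dict.mk L).get? t with
       | some ch => some (fun (_ : Option (List Char)) => some ch)
       | none => (PySem.Dict.mk M).get? t) := by
  intro L
  induction L with
  | nil => intro M t; rfl
  | cons p rest ih =>
    intro M t
    obtain ⟨a, ch⟩ := p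
    simp only [List.map_cons, List.cons_append, PySem.Dict.get?_mk_cons]
    by_cases hk : (a == t) = true
    · simp [hk]
    · have hk' : (a == t) = false := by
        cases hb : (a == t) with
        | false => rfl
        | true => exact absurd hb hk
      simp only [hk']
      exact ih M t

theorem pvHandlers_get (t : List Char) :
    pvHandlers.get? t =
      (match (PySem.Dict.mk pvAliasPairs).get? t with
       | some ch => some (fun (_ : Option (List Char)) => some ch)
       | none =>
          if ("upper".toList == t) then some pvUpperH
          else if ("digit".toList == t) then some pvDigitH
          else none) := by
  rw [pvHandlers, pvGet_map_append]
  cases h : (PySem.Dict.mk pvAliasPairs).get? t with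
  | some ch => rfl
  | none =>
    simp only
    rw [PySem.Dict.get?_mk_cons, PySem.Dict.get?_mk_cons]
    rfl

theorem pvCore_eq (working : List Char) : pvStemA working = pvStemB working := by
  rcases pvDecomp working with hno | ⟨a, b, ha, hw⟩
  · -- no underscore: head = working, no second token
    have hsplit : PySem.Chars.splitOn working "_".toList = [working] := by
      rw [pvSplitOn_eq, pvMsplit_no working [] hno]; rfl
    have hpart : pvPartition working = (working, false, []) := pvPartition_no working hno
    have hloop : pvAliasLoop pvAliasPairs working = (PySem.Dict.mk pvAliasPairs).get? working := by
      apply pvAliasLoop_eq_get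
      intro p hp
      rw [show ("_".toList : List Char) = ['_'] from rfl,
        pvStartswith_no_us working p.1 hno, Bool.or_false, pvBeq_comm]
    have hu : PySem.Chars.startswith working ['u','p','p','e','r','_'] = false :=
      pvStartswith_no_us working "upper".toList hno
    have hd : PySem.Chars.startswith working ['d','i','g','i','t','_'] = false :=
      pvStartswith_no_us working "digit".toList hno
    rw [pvStemA, pvStemB, hpart, hloop]
    simp only [pvHandlers_get]
    cases hget : (PySem.Dict.mk pvAliasPairs).get? working with
    | some ch => simp
    | none =>
      have hs' : PySem.Chars.splitOn working ['_'] = [working] := hsplit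
      by_cases hua : ("upper".toList : List Char) = working
      · rw [← hua]; decide
      · by_cases hda : ("digit".toList : List Char) = working
        · rw [← hda]; decide
        · have hu2 : PySem.Chars.startswith working "upper_".toList = false := hu
          have hd2 : PySem.Chars.startswith working "digit_".toList = false := hd
          have hbu : (("upper".toList : List Char) == working) = false := beq_eq_false_iff_ne.mpr hua
          have hbd : (("digit".toList : List Char) == working) = false := beq_eq_false_iff_ne.mpr hda
          simp only [hu2, hd2, hbu, hbd, hsplit, Bool.false_eq_true, if_false]
  · -- working = a ++ '_' :: b with '_' ∉ a: head = a, second token = (pvPartition b).1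
    subst hw
    have hmem : '_' ∈ a ++ '_' :: b := by simp
    have hpart : pvPartition (a ++ '_' :: b) = (a, true, b) := pvPartition_app a b ha
    obtain ⟨r, hb⟩ := pvMsplit_head b
    have hsplit : PySem.Chars.splitOn (a ++ '_' :: b) "_".toList = a :: pvMsplit [] b := by
      rw [pvSplitOn_eq, pvMsplit_app a b [] ha]; rfl
    have hloop : pvAliasLoop pvAliasPairs (a ++ '_' :: b) = (PySem.Dict.mk pvAliasPairs).get? a := by
      apply pvAliasLoop_eq_get
      intro p hp
      have hkey : '_' ∉ p.1 := pvAliasKeys_no_us p hp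
      have hne : ((a ++ '_' :: b) == p.1) = false := by
        rw [beq_eq_false_iff_ne]
        intro hh
        exact hkey (hh ▸ hmem)
      have hsw : PySem.Chars.startswith (a ++ '_' :: b) (p.1 ++ "_".toList) = (p.1 == a) := by
        rw [show ("_".toList : List Char) = ['_'] from rfl]
        by_cases hpa : p.1 = a
        · rw [(pvPrefix_us p.1 a b hkey ha).mpr hpa]
          simp [hpa]
        · have hne' : PySem.Chars.startswith (a ++ '_' :: b) (p.1 ++ ['_']) ≠ true := by
            intro hh; exact hpa ((pvPrefix_us p.1 a b hkey ha).mp hh)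
          simp only [Bool.not_eq_true] at hne'
          rw [hne']
          symm
          rw [beq_eq_false_iff_ne]
          exact hpa
      rw [hne, hsw, Bool.false_or]
    rw [pvStemA, pvStemB, hpart, hloop]
    simp only [pvHandlers_get]
    cases hget : (PySem.Dict.mk pvAliasPairs).get? a with
    | some ch => simp
    | none =>
      by_cases hua : a = "upper".toList
      · subst hua
        have hu : PySem.Chars.startswith ('u'::'p'::'p'::'e'::'r'::'_'::b) ['u','p','p','e','r','_'] = true :=
          (pvPrefix_us "upper".toList "upper".toList b (by decide) (by decide)).mpr rfl
        have hget' : (PySem.Dict.mk pvAliasPairs).get? ['u','p','p','e','r'] = none := hget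
        have hkey : PySem.Chars.splitOn (PySem.List.slice ('u'::'p'::'p'::'e'::'r'::'_'::b) (some 6) none) ['_'] = (pvPartition b).1 :: r := by
          have h1 : PySem.List.slice ('u'::'p'::'p'::'e'::'r'::'_'::b) (some 6) none = b := by
            rw [show ((6:Int)) = ((6:Nat):Int) from rfl, PySem.List.slice_from_natCast]
            exact rfl
          rw [h1, show (['_'] : List Char) = "_".toList from rfl, pvSplitOn_eq, hb]
        simp [hu, hkey, pvUpperH]
      · by_cases hda : a = "digit".toList
        · subst hda
          have hu : PySem.Chars.startswith ('d'::'i'::'g'::'i'::'t'::'_'::b) ['u','p','p','e','r','_'] = false := by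
            have hne' : PySem.Chars.startswith ("digit".toList ++ '_' :: b) ("upper".toList ++ ['_']) ≠ true := by
              intro hh
              exact absurd ((pvPrefix_us "upper".toList "digit".toList b (by decide) (by decide)).mp hh) (by decide)
            simpa using hne'
          have hd : PySem.Chars.startswith ('d'::'i'::'g'::'i'::'t'::'_'::b) ['d','i','g','i','t','_'] = true :=
            (pvPrefix_us "digit".toList "digit".toList b (by decide) (by decide)).mpr rfl
          have hget' : (PySem.Dict.mk pvAliasPairs).get? ['d','i','g','i','t'] = none := hget
          have hkey : PySem.Chars.splitOn (PySem.List.slice ('d'::'i'::'g'::'i'::'t'::'_'::b) (some 6) none) ['_'] = (pvPartition b).1 :: r := by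
            have h1 : PySem.List.slice ('d'::'i'::'g'::'i'::'t'::'_'::b) (some 6) none = b := by
              rw [show ((6:Int)) = ((6:Nat):Int) from rfl, PySem.List.slice_from_natCast]
              exact rfl
            rw [h1, show (['_'] : List Char) = "_".toList from rfl, pvSplitOn_eq, hb]
          have ht0u : ((['u','p','p','e','r'] : List Char) == ['d','i','g','i','t']) = false := by decide
          simp [hu, hd, hkey, ht0u, pvDigitH]
        · have hu : PySem.Chars.startswith (a ++ '_' :: b) ['u','p','p','e','r','_'] = false := by
            have hne' : PySem.Chars.startswith (a ++ '_' :: b) ("upper".toList ++ ['_']) ≠ true := by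
              intro hh
              exact hua ((pvPrefix_us "upper".toList a b (by decide) ha).mp hh).symm
            simpa using hne'
          have hd : PySem.Chars.startswith (a ++ '_' :: b) ['d','i','g','i','t','_'] = false := by
            have hne' : PySem.Chars.startswith (a ++ '_' :: b) ("digit".toList ++ ['_']) ≠ true := by
              intro hh
              exact hda ((pvPrefix_us "digit".toList a b (by decide) ha).mp hh).symm
            simpa using hne'
          have hs' : PySem.Chars.splitOn (a ++ '_' :: b) ['_'] = a :: pvMsplit [] b := hsplit
          have ht0u : ¬ ((['u','p','p','e','r'] : List Char) = a) := fun hh => hua hh.symm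
          have ht0d : ¬ ((['d','i','g','i','t'] : List Char) = a) := fun hh => hda hh.symm
          simp [hu, hd, hs', ht0u, ht0d]

-- ===== VERDICT (by name: the statement is the Claim_ definition above) =====
theorem stem_to_char_py_spec : Claim_equal_stem_to_char_py := by
  intro stem _
  unfold Spec_stem_to_char_py
  simp only [stem_to_char_py, stem_to_char_py_alt, pvCore_eq]
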